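-- pv_equiv track=rewrite | github.com/Code-Angler/Algorism_Quiz | simple_Quizs_3.py | solution
-- ===== SOURCE A (Python) =====
-- def solution(s):
--     answer = ''
--     sprate_words = s.split(" ")
--     for word in sprate_words:
--         for i in range(len(word)):
--             if i % 2 == 0:
--                 answer += word[i].upper()
--             else:
--                 answer += word[i]
--         answer += " "
--     return answer[:-1]
-- ===== SOURCE B (Python) =====
-- def solution(s):
--     out = []
--     idx = 0
--     for ch in s:
--         if ch == ' ':
--             out.append(' ')
--             idx = 0
--         else:
--             out.append(ch.upper() if idx % 2 == 0 else ch)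
--             idx += 1
--     return ''.join(out)
-- ===== Notes on version B (the rewrite author's own statement) =====
-- stated objective: simpler
-- what changed: Replaces split-into-words plus a nested index loop and the trailing-space-then-slice trick with a single left-to-right scan that keeps a within-word position counter, resetting it at each space.
import Mathlib
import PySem

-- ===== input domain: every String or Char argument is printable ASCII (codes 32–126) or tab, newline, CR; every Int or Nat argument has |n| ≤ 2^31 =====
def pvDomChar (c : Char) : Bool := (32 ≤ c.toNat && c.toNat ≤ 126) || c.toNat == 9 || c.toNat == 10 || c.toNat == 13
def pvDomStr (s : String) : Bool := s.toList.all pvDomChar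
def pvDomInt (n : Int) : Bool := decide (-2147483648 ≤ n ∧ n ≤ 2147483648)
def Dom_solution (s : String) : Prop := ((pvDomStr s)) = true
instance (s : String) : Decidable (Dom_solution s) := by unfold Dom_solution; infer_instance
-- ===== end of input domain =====

-- B replaces the split-into-words nested loops and the trailing-space slice by one
-- scan with a within-word position counter (objective: simpler).

-- ===== PORT A =====
def solution (s : String) : String :=
  let words := PySem.Chars.splitOn s.toList [' ']
  let answer := words.foldl (fun ans w =>
    ((PySem.List.pyRange 0 (w.length : Int) 1).foldl (fun ans i =>
      match PySem.List.pyGet? w i with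
      | some c => ans ++ [if i % 2 == 0 then PySem.Chars.upperChar c else c]
      | none => ans) ans) ++ [' ']) ([] : List Char)
  String.ofList (PySem.List.slice answer none (some (-1)))

-- ===== PORT B =====
def solution_alt (s : String) : String :=
  let st := s.toList.foldl (fun (st : List Char × Nat) ch =>
    if ch == ' ' then (st.1 ++ [' '], 0)
    else (st.1 ++ [if st.2 % 2 == 0 then PySem.Chars.upperChar ch else ch], st.2 + 1)) ([], 0)
  String.ofList st.1

-- ===== PRECONDITION & SPEC =====
def Spec_solution (s : String) (out : String) : Prop := out = solution_alt s
instance (s : String) (out : String) : Decidable (Spec_solution s out) := by unfold Spec_solution; infer_instance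

-- ===== CLAIM (what is proved, stated in full; the proofs are below) =====
def Claim_equal_solution : Prop := ∀ (s : String), Dom_solution s → Spec_solution s (solution s)

-- ===== LEMMAS AND PROOFS =====

-- per-word char mapper starting at absolute index i (A's inner loop result)
def mW : List Char → Nat → List Char
  | [], _ => []
  | c :: cs, i => (if i % 2 = 0 then PySem.Chars.upperChar c else c) :: mW cs (i + 1)

-- natural single-space splitter (characterisation of PySem.Chars.splitOn with sep [' '])
def fsp : List Char → List Char → List (List Char)
  | [], cur => [cur.reverse]
  | c :: rest, cur => if c = ' ' then cur.reverse :: fsp rest [] else fsp rest (c :: cur)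

-- B's scan as structural recursion
def bScan : List Char → Nat → List Char
  | [], _ => []
  | c :: cs, i =>
    if c = ' ' then ' ' :: bScan cs 0
    else (if i % 2 = 0 then PySem.Chars.upperChar c else c) :: bScan cs (i + 1)

theorem splitOn_go_char (fuel : Nat) :
    ∀ (l cur : List Char) (accs : List (List Char)), l.length ≤ fuel →
      PySem.Chars.splitOn.go [' '] fuel l cur accs = accs.reverse ++ fsp l cur := by
  induction fuel with
  | zero =>
    intro l cur accs h
    have hl : l = [] := by cases l <;> simp_all
    subst hl
    simp [PySem.Chars.splitOn.go, fsp]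
  | succ n ih =>
    intro l cur accs h
    cases l with
    | nil => simp [PySem.Chars.splitOn.go, fsp]
    | cons c rest =>
      have hle : rest.length ≤ n := by simpa using Nat.le_of_succ_le_succ h
      by_cases hc : c = ' '
      · subst hc
        have hp : List.isPrefixOf [' '] (' ' :: rest) = true := by simp [List.isPrefixOf]
        simp [PySem.Chars.splitOn.go, hp, fsp, ih _ _ _ hle]
      · have hp : List.isPrefixOf [' '] (c :: rest) = false := by
          simp [List.isPrefixOf]; exact fun h' => absurd h'.symm hc
        simp [PySem.Chars.splitOn.go, hp, fsp, hc, ih _ _ _ hle]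

theorem splitOn_char (l : List Char) : PySem.Chars.splitOn l [' '] = fsp l [] := by
  have := splitOn_go_char (l.length + 1) l [] [] (by omega)
  simpa [PySem.Chars.splitOn] using this

theorem mW_snoc (xs : List Char) (c : Char) :
    ∀ i, mW (xs ++ [c]) i
      = mW xs i ++ [if (i + xs.length) % 2 = 0 then PySem.Chars.upperChar c else c] := by
  induction xs with
  | nil => intro i; simp [mW]
  | cons x xs ih =>
    intro i
    simp only [List.cons_append, mW, ih (i + 1), List.length_cons]
    have h2 : i + 1 + xs.length = i + (xs.length + 1) := by omega
    rw [h2]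
    rfl

-- A's inner loop over pyRange k..len computes the mapped suffix
theorem inner_loop (w : List Char) :
    ∀ (k : Nat) (ans : List Char),
      (PySem.List.pyRange (k : Int) (w.length : Int) 1).foldl (fun ans i =>
        match PySem.List.pyGet? w i with
        | some c => ans ++ [if i % 2 == 0 then PySem.Chars.upperChar c else c]
        | none => ans) ans = ans ++ mW (w.drop k) k := by
  intro k
  induction hn : w.length - k generalizing k with
  | zero =>
    intro ans
    have hk : w.length ≤ k := by omega
    rw [List.drop_eq_nil_of_le hk]
    rw [PySem.List.pyRange_one]
    have h0 : ((w.length : Int) - (k : Int)).toNat = 0 := by omega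
    simp [h0, mW]
  | succ n ih =>
    intro ans
    have hk : k < w.length := by omega
    rw [PySem.List.pyRange_one_cons (by exact_mod_cast hk)]
    simp only [List.foldl_cons]
    have hget : PySem.List.pyGet? w (k : Int) = some w[k] := by
      simp [PySem.List.pyGet?_natCast, List.getElem?_eq_getElem hk]
    rw [hget]
    have hmod : (((k : Int)) % 2 == 0) = (decide (k % 2 = 0)) := by
      have : ((k : Int)) % 2 = ((k % 2 : Nat) : Int) := by
        rw [show ((2 : Int)) = ((2 : Nat) : Int) from rfl, ← Int.natCast_mod]
      rw [this]
      rcases Nat.mod_two_eq_zero_or_one k with hh | hh <;> simp [hh]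
    have hdrop : w.drop k = w[k] :: w.drop (k + 1) := List.drop_eq_getElem_cons hk
    have : ((k : Int) + 1) = ((k + 1 : Nat) : Int) := by push_cast; ring
    rw [this, ih (k + 1) (by omega)]
    rw [hdrop]
    simp [mW, hmod]

-- folding word-blocks is flatMap
theorem words_foldl (ws : List (List Char)) :
    ∀ ans, ws.foldl (fun ans w => (ans ++ mW w 0) ++ [' ']) ans
      = ans ++ ws.flatMap (fun w => mW w 0 ++ [' ']) := by
  induction ws with
  | nil => intro ans; simp
  | cons w ws ih => intro ans; simp [List.append_assoc, List.flatMap]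

-- the split-map-join composite equals B's scan (generalised over the pending word cur)
theorem fsp_flatMap (l : List Char) :
    ∀ cur, (fsp l cur).flatMap (fun w => mW w 0 ++ [' '])
      = mW cur.reverse 0 ++ bScan l cur.length ++ [' '] := by
  induction l with
  | nil => intro cur; simp [fsp, bScan]
  | cons c rest ih =>
    intro cur
    by_cases hc : c = ' '
    · subst hc; simp [fsp, bScan, mW, ih []]
    · simp only [fsp, if_neg hc, bScan, ih (c :: cur), List.reverse_cons]
      rw [mW_snoc]
      simp

-- B's foldl computes bScan
theorem b_foldl (l : List Char) :
    ∀ (out : List Char) (i : Nat),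
      (l.foldl (fun (st : List Char × Nat) ch =>
        if ch == ' ' then (st.1 ++ [' '], 0)
        else (st.1 ++ [if st.2 % 2 == 0 then PySem.Chars.upperChar ch else ch], st.2 + 1))
        (out, i)).1 = out ++ bScan l i := by
  induction l with
  | nil => intro out i; simp [bScan]
  | cons c cs ih =>
    intro out i
    rw [List.foldl_cons]
    by_cases hc : c = ' '
    · subst hc
      rw [if_pos (by simp)]
      rw [ih]
      simp [bScan]
    · rw [if_neg (by simp [hc])]
      rw [ih]
      simp [bScan, hc]

-- ===== VERDICT (by name: the statement is the Claim_ definition above) =====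
theorem solution_spec : Claim_equal_solution := by
  intro s _
  unfold Spec_solution solution solution_alt
  rw [splitOn_char]
  have hinner : ∀ (ans w : List Char),
      (PySem.List.pyRange 0 (w.length : Int) 1).foldl (fun ans i =>
        match PySem.List.pyGet? w i with
        | some c => ans ++ [if i % 2 == 0 then PySem.Chars.upperChar c else c]
        | none => ans) ans = ans ++ mW w 0 := by
    intro ans w
    have := inner_loop w 0 ans
    simpa using this
  simp only [hinner]
  rw [words_foldl]
  have := fsp_flatMap s.toList []
  simp only [List.reverse_nil, mW, List.length_nil] at this
  rw [List.nil_append, this, PySem.List.slice_to_neg_one, List.nil_append,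
    List.dropLast_concat]
  rw [b_foldl]
  simp
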